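-- pv_equiv track=rewrite | github.com/ashishgupta2014/ds-topics | take_u_forword/heaps/Replace_elements_by_its_rank_in_the_array.py | ranker
-- ===== SOURCE A (Python) =====
-- def ranker(nums):
--     temp = {}
--     j = 0
--     for i in range(len(nums)):
--         if nums[i] not in temp:
--             temp[nums[i]] = j+1
--             j += 1
--     return temp
-- ===== SOURCE B (Python) =====
-- def ranker(nums):
--     pos = {v: i for i, v in reversed(list(enumerate(nums)))}
--     order = sorted(pos, key=pos.get)
--     return {v: r for r, v in enumerate(order, 1)}
-- ===== Notes on version B (the rewrite author's own statement) =====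
-- stated objective: alternative
-- what changed: Instead of A's single guarded accumulation loop (dict + manual counter j), B builds a first-occurrence-index map by overwriting a dict comprehension over the REVERSED enumerate, then SORTS the keys by that index and numbers the sorted list 1-based: a map-then-sort-then-number algorithm in place of incremental accumulation.
import Mathlib
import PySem

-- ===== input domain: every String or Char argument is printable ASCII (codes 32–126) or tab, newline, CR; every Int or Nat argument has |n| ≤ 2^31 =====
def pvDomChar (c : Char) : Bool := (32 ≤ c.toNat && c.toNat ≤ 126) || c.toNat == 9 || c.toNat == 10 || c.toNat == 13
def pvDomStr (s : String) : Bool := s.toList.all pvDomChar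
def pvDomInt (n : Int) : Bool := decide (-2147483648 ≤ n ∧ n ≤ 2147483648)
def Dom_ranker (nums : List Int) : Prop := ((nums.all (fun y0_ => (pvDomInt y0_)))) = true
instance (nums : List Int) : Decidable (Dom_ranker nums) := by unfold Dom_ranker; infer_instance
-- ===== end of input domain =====

-- B replaces A's guarded single-loop accumulation (dict + manual counter) with a sort-based
-- algorithm: sort the set of values by first-occurrence index, then number the sorted list 1-based.

-- ===== PORT A =====
-- 'for i in range(len(nums))' with the state (temp, j); 'nums[i] not in temp' is the contains test.
def ranker (nums : List Int) : List (Int × Int) :=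
  let r := (PySem.List.pyRange 0 (PySem.List.len nums) 1).foldl
    (fun (tj : PySem.Dict Int Int × Int) (i : Int) =>
      let x := PySem.List.pyGetD nums i 0
      if tj.1.contains x then tj else (tj.1.insert x (tj.2 + 1), tj.2 + 1))
    (PySem.Dict.empty, 0)
  r.1.items

-- ===== PORT B =====
-- pos = {v: i for i, v in reversed(list(enumerate(nums)))}: a dict comprehension is a fold of
-- overwriting inserts in iteration order. sorted(pos, key=pos.get): iterating a dict yields its
-- keys; pos.get v is ported as getD v 0 — exact here, every sorted element is a key of pos.
def ranker_alt (nums : List Int) : List (Int × Int) :=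
  let pos := ((PySem.List.enumerate nums 0).reverse).foldl
    (fun (d : PySem.Dict Int Int) (p : Int × Int) => d.insert p.2 p.1) PySem.Dict.empty
  let order := PySem.List.sorted pos.keys (fun v => pos.getD v 0)
  (PySem.List.enumerate order 1).map (fun p => (p.2, p.1))

-- ===== PRECONDITION & SPEC =====
def Spec_ranker (nums : List Int) (out : List (Int × Int)) : Prop := out = ranker_alt nums
instance (nums : List Int) (out : List (Int × Int)) : Decidable (Spec_ranker nums out) := by unfold Spec_ranker; infer_instance

-- ===== CLAIM (what is proved, stated in full; the proofs are below) =====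
def Claim_equal_ranker : Prop := ∀ (nums : List Int), Dom_ranker nums → Spec_ranker nums (ranker nums)

-- ===== LEMMAS AND PROOFS =====

-- the state A's loop maintains, expressed over the distinct prefix keys
def rkDict (s : List Int) : PySem.Dict Int Int :=
  PySem.Dict.mk ((PySem.List.enumerate s 0).map (fun p => (p.2, p.1 + 1)))

lemma rkDict_contains (s : List Int) (x : Int) :
    (rkDict s).contains x = decide (x ∈ s) := by
  simp [rkDict, PySem.Dict.contains_mk, List.any_map, Function.comp_def]
  rw [show (fun p : Int × Int => p.2 == x) = (fun y : Int => y == x) ∘ (·.2) from rfl,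
    ← List.any_map, PySem.List.map_snd_enumerate, List.any_beq']
  simp

lemma ranker_fold_inv (nums : List Int) :
    nums.foldl
      (fun (tj : PySem.Dict Int Int × Int) (x : Int) =>
        if tj.1.contains x then tj else (tj.1.insert x (tj.2 + 1), tj.2 + 1))
      (PySem.Dict.empty, 0)
    = (rkDict (PySem.Set.ofList nums), ((PySem.Set.ofList nums).length : Int)) := by
  induction nums using List.reverseRecOn with
  | nil => rfl
  | append_singleton xs x ih =>
    rw [List.foldl_append, ih, PySem.Set.ofList_append_singleton]
    by_cases hx : x ∈ PySem.Set.ofList xs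
    · have hx' : x ∈ xs := by simpa using hx
      simp [rkDict_contains, hx', PySem.Set.add]
    · have hc : (rkDict (PySem.Set.ofList xs)).contains x = false := by
        simp [rkDict_contains, hx]
      simp only [List.foldl_cons, List.foldl_nil, hc, if_neg, Bool.false_eq_true,
        not_false_eq_true, PySem.Set.add_of_not_mem hx]
      refine Prod.ext ?_ ?_
      · apply PySem.Dict.ext
        rw [PySem.Dict.items_insert]
        simp only [hc]
        simp [rkDict, PySem.List.enumerate_append, PySem.List.enumerate_cons]
      · simp

-- the first-occurrence indices strictly increase along set(nums)'s insertion order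
lemma ofList_pairwise_idx (nums : List Int) :
    (PySem.Set.ofList nums).Pairwise
      (fun a b => (PySem.List.index? nums a).getD 0 < (PySem.List.index? nums b).getD 0) := by
  induction nums with
  | nil => simp [PySem.Set.ofList_nil]
  | cons x xs ih =>
    rw [PySem.Set.ofList_cons]
    constructor
    · intro b hb
      have hb' := (PySem.Set.mem_discard _ _ _).mp hb
      have hbx : b ∈ xs := (PySem.Set.mem_ofList _ _).mp hb'.1
      obtain ⟨k, hk⟩ := Option.isSome_iff_exists.mp
        ((PySem.List.index?_isSome_iff xs b).mpr hbx)
      rw [PySem.List.index?_cons_self, PySem.List.index?_cons_of_ne xs (Ne.symm hb'.2), hk]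
      simp
    · have hsub : (PySem.Set.discard (PySem.Set.ofList xs) x).Sublist (PySem.Set.ofList xs) := by
        simp [PySem.Set.discard, List.filter_sublist]
      refine ((ih.sublist hsub).imp_of_mem ?_)
      intro a b ha hb hab
      have ha' := (PySem.Set.mem_discard _ _ _).mp ha
      have hb' := (PySem.Set.mem_discard _ _ _).mp hb
      obtain ⟨ka, hka⟩ := Option.isSome_iff_exists.mp
        ((PySem.List.index?_isSome_iff xs a).mpr ((PySem.Set.mem_ofList _ _).mp ha'.1))
      obtain ⟨kb, hkb⟩ := Option.isSome_iff_exists.mp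
        ((PySem.List.index?_isSome_iff xs b).mpr ((PySem.Set.mem_ofList _ _).mp hb'.1))
      rw [PySem.List.index?_cons_of_ne xs (Ne.symm ha'.2), PySem.List.index?_cons_of_ne xs (Ne.symm hb'.2),
        hka, hkb]
      rw [hka, hkb] at hab
      simpa using hab

-- the reverse-overwrite dict maps every value to its FIRST index (the last insert wins)
lemma build_get? (xs : List Int) (v : Int) : ∀ s : Int,
    (((PySem.List.enumerate xs s).reverse).foldl
      (fun (d : PySem.Dict Int Int) (p : Int × Int) => d.insert p.2 p.1) PySem.Dict.empty).get? v
    = (PySem.List.index? xs v).map (fun k => s + (k : Int)) := by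
  induction xs with
  | nil => intro s; simp [PySem.List.enumerate_nil, PySem.List.index?_eq_idxOf?]
  | cons x xs ih =>
    intro s
    rw [PySem.List.enumerate_cons, List.reverse_cons, List.foldl_append]
    simp only [List.foldl_cons, List.foldl_nil]
    by_cases hv : v = x
    · subst hv
      rw [PySem.Dict.get?_insert_self, PySem.List.index?_cons_self]
      simp
    · rw [PySem.Dict.get?_insert_of_ne _ _ hv, ih, PySem.List.index?_cons_of_ne xs (Ne.symm hv)]
      cases PySem.List.index? xs v with
      | none => simp
      | some k => simp; ring

lemma build_keys (nums : List Int) :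
    (((PySem.List.enumerate nums 0).reverse).foldl
      (fun (d : PySem.Dict Int Int) (p : Int × Int) => d.insert p.2 p.1) PySem.Dict.empty).keys
    = PySem.Set.ofList nums.reverse := by
  rw [PySem.Dict.keys_foldl_insert_key]
  simp [PySem.Set.update_nil_left, PySem.List.map_snd_enumerate]

-- the sort in B puts the keys in first-appearance order, i.e. set(nums)
lemma sorted_keys_eq (nums : List Int) :
    (PySem.List.sorted
      (((PySem.List.enumerate nums 0).reverse).foldl
        (fun (d : PySem.Dict Int Int) (p : Int × Int) => d.insert p.2 p.1) PySem.Dict.empty).keys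
      (fun v => (((PySem.List.enumerate nums 0).reverse).foldl
        (fun (d : PySem.Dict Int Int) (p : Int × Int) => d.insert p.2 p.1) PySem.Dict.empty).getD v 0))
    = PySem.Set.ofList nums := by
  have hgetD : ∀ v ∈ nums,
      (((PySem.List.enumerate nums 0).reverse).foldl
        (fun (d : PySem.Dict Int Int) (p : Int × Int) => d.insert p.2 p.1) PySem.Dict.empty).getD v 0
      = ((PySem.List.index? nums v).getD 0 : Nat) := by
    intro v hv
    obtain ⟨k, hk⟩ := Option.isSome_iff_exists.mp ((PySem.List.index?_isSome_iff nums v).mpr hv)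
    rw [PySem.Dict.getD_eq_get?_getD, build_get? nums v 0, hk]
    simp
  apply PySem.List.sorted_eq_of_perm_of_pairwise_lt
  · rw [build_keys]
    refine (List.perm_ext_iff_of_nodup (PySem.Set.nodup_ofList _) (PySem.Set.nodup_ofList _)).mpr ?_
    intro a
    simp [PySem.Set.mem_ofList]
  · refine (ofList_pairwise_idx nums).imp_of_mem ?_
    intro a b ha hb hab
    have ha' : a ∈ nums := by simpa using (PySem.Set.mem_ofList _ _).mp ha
    have hb' : b ∈ nums := by simpa using (PySem.Set.mem_ofList _ _).mp hb
    rw [hgetD a ha', hgetD b hb']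
    exact_mod_cast hab

-- numbering from 0 and adding 1 is numbering from 1
lemma enum_shift (s : List Int) (n : Int) :
    (PySem.List.enumerate s n).map (fun p => (p.2, p.1 + 1))
    = (PySem.List.enumerate s (n + 1)).map (fun p => (p.2, p.1)) := by
  induction s generalizing n with
  | nil => simp [PySem.List.enumerate_nil]
  | cons y ys ih => simp [PySem.List.enumerate_cons, ih]

lemma ranker_eq_alt (nums : List Int) : ranker nums = ranker_alt nums := by
  unfold ranker ranker_alt
  dsimp only
  rw [PySem.List.foldl_pyRange_zero_pyGetD nums 0
    (fun (tj : PySem.Dict Int Int × Int) (x : Int) =>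
      if tj.1.contains x then tj else (tj.1.insert x (tj.2 + 1), tj.2 + 1))
    (PySem.Dict.empty, 0)]
  rw [ranker_fold_inv, sorted_keys_eq]
  -- both sides enumerate set(nums); A numbers from 0 and adds 1, B numbers from 1
  show ((PySem.List.enumerate (PySem.Set.ofList nums) 0).map (fun p => (p.2, p.1 + 1))) = _
  rw [enum_shift]
  norm_num

theorem ranker_spec : Claim_equal_ranker := by
  intro nums _
  exact ranker_eq_alt nums
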